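-- pv_equiv track=rewrite | github.com/Abjad/abjad | tags/release-1.1.1/abjad/tools/listtools/insert_slice_cyclic.py | insert_slice_cyclic
-- ===== SOURCE A (Python) =====
-- def insert_slice_cyclic(l, s, overhang = (0, 0)):
--    '''Insert a copy of the elements of *s* between each of the
--    elements of *l*. Read *overhang* to determine whether to insert
--    a copy of the elements of s before the first element of *l*
--    or after the last element of *l*.
--
--    * When ``overhang[0] == 1`` insert a copy of the elements of *s* \
--       before the first element of *l*.
--    * When ``overhang[-1] == 1`` insert a copy of the elements of *s* \
--       after the last element of *l*.
--
--    Examples: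
--
--    ::
--
--       >>> l = [0, 1, 2, 3, 4]
--       >>> s = ['A', 'B']
--
--    ::
--
--       >>> listtools.insert_slice_cyclic(l, s)
--       [0, 'A', 'B', 1, 'A', 'B', 2, 'A', 'B', 3, 'A', 'B', 4]
--
--    ::
--
--       >>> listtools.insert_slice_cyclic(l, s, overhang = (0, 1))
--       [0, 'A', 'B', 1, 'A', 'B', 2, 'A', 'B', 3, 'A', 'B', 4, 'A', 'B']
--
--    ::
--
--       >>> listtools.insert_slice_cyclic(l, s, overhang = (1, 0))
--       ['A', 'B', 0, 'A', 'B', 1, 'A', 'B', 2, 'A', 'B', 3, 'A', 'B', 4]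
--
--    ::
--
--       >>> listtools.insert_slice_cyclic(l, s, overhang = (1, 1))
--       ['A', 'B', 0, 'A', 'B', 1, 'A', 'B', 2, 'A', 'B', 3, 'A', 'B', 4, 'A', 'B']'''
--
--    result = [ ]
--
--    if overhang[0] == 1:
--       result.extend(s)
--
--    for element in l[:-1]:
--       result.append(element)
--       result.extend(s)
--
--    result.append(l[-1])
--
--    if overhang[-1] == 1:
--       result.extend(s)
--
--    return result
-- ===== SOURCE B (Python) =====
-- def insert_slice_cyclic(l, s, overhang=(0, 0)):
--     # Closed-form construction: the interleaved core has len(l)*(len(s)+1) - len(s)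
--     # slots; slot i holds l[i // period] when i falls on a period boundary and
--     # s[i % period - 1] otherwise.
--     period = len(s) + 1
--     core = [l[i // period] if i % period == 0 else s[i % period - 1]
--             for i in range(len(l) * period - len(s))]
--     if overhang[0] == 1:
--         core[:0] = s
--     if overhang[-1] == 1:
--         core += s
--     return core
-- ===== Notes on version B (the rewrite author's own statement) =====
-- stated objective: alternative
-- what changed: B replaces A's appending loop with a closed-form construction: it computes the output length len(l)*(len(s)+1)-len(s) and fills each slot by index arithmetic (i//period picks an element of l on period boundaries, i%period-1 picks an element of s otherwise); Pre_ excludes only l = [], where A raises IndexError at l[-1].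
import Mathlib
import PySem

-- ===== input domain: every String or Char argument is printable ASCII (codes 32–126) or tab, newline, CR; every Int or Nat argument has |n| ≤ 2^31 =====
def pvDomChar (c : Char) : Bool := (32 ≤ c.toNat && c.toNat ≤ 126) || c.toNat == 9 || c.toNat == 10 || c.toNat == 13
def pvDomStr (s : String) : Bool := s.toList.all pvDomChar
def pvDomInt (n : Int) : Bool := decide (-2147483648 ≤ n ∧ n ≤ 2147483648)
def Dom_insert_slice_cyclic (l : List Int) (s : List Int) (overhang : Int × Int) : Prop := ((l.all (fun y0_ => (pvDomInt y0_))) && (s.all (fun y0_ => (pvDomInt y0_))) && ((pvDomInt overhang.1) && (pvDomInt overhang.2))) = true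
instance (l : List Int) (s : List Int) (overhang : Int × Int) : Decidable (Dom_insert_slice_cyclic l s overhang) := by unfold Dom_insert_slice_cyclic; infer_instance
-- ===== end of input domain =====

-- B builds the interleaved core in closed form by index arithmetic over one range
-- instead of A's appending loop (objective: alternative; not claimed faster).

-- ===== PORT A =====
-- literal port of A: optional leading copy of s, loop over l[:-1] appending element
-- then s, append l[-1] (IndexError on empty l → excluded by Pre_), optional trailing s
def insert_slice_cyclic (l : List Int) (s : List Int) (overhang : Int × Int) : List Int :=
  let result : List Int := []
  let result := if overhang.1 = 1 then result ++ s else result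
  let result := (PySem.List.slice l none (some (-1))).foldl (fun r e => (r ++ [e]) ++ s) result
  match PySem.List.pyGet? l (-1) with
  | none => []  -- Python raises IndexError here (l = []); excluded by Pre_
  | some x =>
    let result := result ++ [x]
    if overhang.2 = 1 then result ++ s else result

-- ===== PORT B =====
-- literal port of Source B: period = len(s)+1; one comprehension over
-- range(len(l)*period - len(s)) filling each slot by index arithmetic
-- (both pyGetD indices are provably in range whenever the range is nonempty);
-- then the two overhang copies.
def insert_slice_cyclic_alt (l : List Int) (s : List Int) (overhang : Int × Int) : List Int :=
  let period : Int := (s.length : Int) + 1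
  let core := (PySem.List.pyRange 0 ((l.length : Int) * period - (s.length : Int)) 1).map
    (fun i => if PySem.Int.mod i period = 0
              then PySem.List.pyGetD l (PySem.Int.floordiv i period) 0
              else PySem.List.pyGetD s (PySem.Int.mod i period - 1) 0)
  let core := if overhang.1 = 1 then s ++ core else core
  if overhang.2 = 1 then core ++ s else core

-- ===== PRECONDITION & SPEC =====
-- Pre_ excludes only l = [], where A raises IndexError at l[-1].
def Pre_insert_slice_cyclic (l : List Int) (_s : List Int) (_overhang : Int × Int) : Prop := l ≠ []
instance (l : List Int) (s : List Int) (overhang : Int × Int) : Decidable (Pre_insert_slice_cyclic l s overhang) := by unfold Pre_insert_slice_cyclic; infer_instance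
def pvWitness_insert_slice_cyclic : List Int × List Int × (Int × Int) := ([0, 1, 2], [7, 8], (1, 0))

def Spec_insert_slice_cyclic (l : List Int) (s : List Int) (overhang : Int × Int) (out : List Int) : Prop := out = insert_slice_cyclic_alt l s overhang
instance (l : List Int) (s : List Int) (overhang : Int × Int) (out : List Int) : Decidable (Spec_insert_slice_cyclic l s overhang out) := by unfold Spec_insert_slice_cyclic; infer_instance

-- ===== CLAIM (what is proved, stated in full; the proofs are below) =====
def Claim_equal_insert_slice_cyclic : Prop := ∀ (l : List Int) (s : List Int) (overhang : Int × Int), Dom_insert_slice_cyclic l s overhang → Pre_insert_slice_cyclic l s overhang → Spec_insert_slice_cyclic l s overhang (insert_slice_cyclic l s overhang)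

-- ===== LEMMAS AND PROOFS =====

-- the interleaved core A builds, as a flatMap over the prefix plus the last element
theorem foldl_body_eq (s : List Int) (L init : List Int) :
    L.foldl (fun r e => (r ++ [e]) ++ s) init = init ++ L.flatMap (fun e => [e] ++ s) := by
  induction L generalizing init with
  | nil => simp
  | cons x xs ih => simp [List.foldl_cons, List.append_assoc, List.flatMap_def]

theorem pyGet?_concat_neg_one (xs : List Int) (x : Int) :
    PySem.List.pyGet? (xs ++ [x]) (-1) = some x := by
  simp [PySem.List.pyGet?, PySem.List.pyIdx?]

-- the Nat-index decode underneath B's comprehension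
def pvDecode (l s : List Int) (i : Nat) : Int :=
  if i % (s.length + 1) = 0 then l.getD (i / (s.length + 1)) 0
  else s.getD (i % (s.length + 1) - 1) 0

theorem map_getD_range (s : List Int) :
    (List.range s.length).map (fun i => s.getD i 0) = s := by
  apply List.ext_getElem
  · simp
  · intro i h1 h2
    simp [List.getD_eq_getElem?_getD, List.getElem?_eq_getElem h2]

-- one period of B's range produces the head element followed by a copy of s
theorem decode_first_block (x : Int) (l s : List Int) :
    (List.range (s.length + 1)).map (pvDecode (x :: l) s) = x :: s := by
  rw [List.range_succ_eq_map]
  simp only [List.map_cons, List.map_map]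
  refine congrArg₂ _ ?_ ?_
  · simp [pvDecode]
  · have : (pvDecode (x :: l) s ∘ Nat.succ) = fun i => if i < s.length then s.getD i 0 else pvDecode (x :: l) s (i + 1) := by
      funext i
      by_cases h : i < s.length
      · simp only [Function.comp, pvDecode, if_pos h]
        have h1 : (i + 1) % (s.length + 1) = i + 1 := Nat.mod_eq_of_lt (by omega)
        simp [Nat.succ_eq_add_one, h1]
      · simp [h]
    rw [this]
    have : (List.range s.length).map (fun i => if i < s.length then s.getD i 0 else pvDecode (x :: l) s (i + 1)) = (List.range s.length).map (fun i => s.getD i 0) := by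
      apply List.map_congr_left
      intro i hi
      simp [List.mem_range.mp hi]
    rw [this, map_getD_range]

-- shifting the index by one period steps to the tail of l
theorem decode_shift (x : Int) (l s : List Int) (i : Nat) :
    pvDecode (x :: l) s (s.length + 1 + i) = pvDecode l s i := by
  unfold pvDecode
  have hm : (s.length + 1 + i) % (s.length + 1) = i % (s.length + 1) :=
    Nat.add_mod_left _ _
  have hd : (s.length + 1 + i) / (s.length + 1) = i / (s.length + 1) + 1 := by
    rw [Nat.add_comm (s.length + 1) i, Nat.add_div_right _ (by omega)]
  rw [hm, hd]
  by_cases h : i % (s.length + 1) = 0 <;> simp [h]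

theorem len_arith (a m : Nat) :
    (a + 1 + 1) * (m + 1) - m = (m + 1) + ((a + 1) * (m + 1) - m) := by
  have e1 : (a + 1 + 1) * (m + 1) = (m + 1) + (a + 1) * (m + 1) := by ring
  have hle : m ≤ (a + 1) * (m + 1) := by nlinarith
  rw [e1, Nat.add_sub_assoc hle]

-- B's core in closed form: flatMap over the prefix plus the last element
theorem natCore (s : List Int) : ∀ (xs : List Int) (x : Int),
    (List.range ((xs ++ [x]).length * (s.length + 1) - s.length)).map (pvDecode (xs ++ [x]) s)
      = xs.flatMap (fun e => [e] ++ s) ++ [x] := by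
  intro xs
  induction xs with
  | nil =>
    intro x
    have : ([x] : List Int).length * (s.length + 1) - s.length = 1 := by simp
    simp [List.range_succ, pvDecode]
  | cons y ys ih =>
    intro x
    have hlen : ((y :: ys) ++ [x]).length * (s.length + 1) - s.length
        = (s.length + 1) + ((ys ++ [x]).length * (s.length + 1) - s.length) := by
      simp only [List.length_append, List.length_cons, List.length_nil]
      exact len_arith ys.length s.length
    rw [hlen, List.range_add, List.map_append, List.map_map]
    have h1 : (List.range (s.length + 1)).map (pvDecode ((y :: ys) ++ [x]) s) = y :: s := by
      simpa using decode_first_block y (ys ++ [x]) s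
    have h2 : (List.range ((ys ++ [x]).length * (s.length + 1) - s.length)).map
        (pvDecode ((y :: ys) ++ [x]) s ∘ fun k => s.length + 1 + k)
        = ys.flatMap (fun e => [e] ++ s) ++ [x] := by
      rw [← ih x]
      apply List.map_congr_left
      intro i _
      simpa using decode_shift y (ys ++ [x]) s i
    rw [h1, h2]
    simp [List.append_assoc]

-- bridge: B's Int-indexed comprehension is the Nat decode over List.range
theorem intCore_eq (l s : List Int) (hl : l ≠ []) :
    (PySem.List.pyRange 0 ((l.length : Int) * ((s.length : Int) + 1) - (s.length : Int)) 1).map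
      (fun i => if PySem.Int.mod i ((s.length : Int) + 1) = 0
                then PySem.List.pyGetD l (PySem.Int.floordiv i ((s.length : Int) + 1)) 0
                else PySem.List.pyGetD s (PySem.Int.mod i ((s.length : Int) + 1) - 1) 0)
      = (List.range (l.length * (s.length + 1) - s.length)).map (pvDecode l s) := by
  have hlen1 : 1 ≤ l.length := by
    cases l with
    | nil => exact absurd rfl hl
    | cons a as => simp
  have hle : s.length ≤ l.length * (s.length + 1) := by nlinarith
  have hN : (l.length : Int) * ((s.length : Int) + 1) - (s.length : Int)
      = ((l.length * (s.length + 1) - s.length : Nat) : Int) := by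
    rw [Nat.cast_sub hle]
    push_cast
    ring
  rw [hN, PySem.List.pyRange_one]
  simp only [Int.sub_zero, Int.toNat_natCast, List.map_map]
  apply List.map_congr_left
  intro i _
  have hcast : ((0 : Int) + (i : Int)) = ((i : Nat) : Int) := by omega
  simp only [Function.comp, hcast]
  have hmod : PySem.Int.mod (i : Int) ((s.length : Int) + 1)
      = ((i % (s.length + 1) : Nat) : Int) := by
    have := PySem.Int.mod_natCast i (s.length + 1)
    push_cast at this ⊢
    exact this
  have hdiv : PySem.Int.floordiv (i : Int) ((s.length : Int) + 1)
      = ((i / (s.length + 1) : Nat) : Int) := by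
    have := PySem.Int.floordiv_natCast i (s.length + 1)
    push_cast at this ⊢
    exact this
  rw [hmod, hdiv]
  unfold pvDecode
  by_cases h : i % (s.length + 1) = 0
  · rw [if_pos (by exact_mod_cast h : ((i % (s.length + 1) : Nat) : Int) = 0), if_pos h,
      PySem.List.pyGetD_natCast]
  · have h1 : ((i % (s.length + 1) : Nat) : Int) ≠ 0 := by exact_mod_cast h
    have h2 : ((i % (s.length + 1) : Nat) : Int) - 1 = ((i % (s.length + 1) - 1 : Nat) : Int) := by
      omega
    rw [if_neg h1, if_neg h, h2, PySem.List.pyGetD_natCast]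

-- ===== VERDICT (by name: the statement is the Claim_ definition above) =====
theorem insert_slice_cyclic_spec : Claim_equal_insert_slice_cyclic := by
  intro l s o _ hpre
  unfold Spec_insert_slice_cyclic
  obtain ⟨xs, x, rfl⟩ : ∃ xs x, l = xs ++ [x] := by
    rcases List.eq_nil_or_concat l with h | ⟨xs, x, h⟩
    · exact absurd h hpre
    · exact ⟨xs, x, by simpa using h⟩
  unfold insert_slice_cyclic insert_slice_cyclic_alt
  rw [PySem.List.slice_to_neg_one, pyGet?_concat_neg_one]
  simp only [List.dropLast_concat]
  rw [foldl_body_eq, intCore_eq (xs ++ [x]) s (by simp), natCore]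
  by_cases h2 : o.2 = 1 <;> by_cases h1 : o.1 = 1 <;>
    simp [h1, h2, List.append_assoc]
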